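-- pv_equiv track=rewrite | github.com/qtcyy/LeetCode-Record-3.17 | 动态规划/chapter10/No4317/main.py | solve
-- ===== SOURCE A (Python) =====
-- from functools import cache
--
-- def solve(n: int) -> int:
--     MOD = 10**7 + 7
--     s = bin(n)[2:]
--     n = len(s)
--
--     @cache
--     def dfs(i: int, cnt: int, is_limit: bool, is_num: bool) -> int:
--         if i == n:
--             return cnt if is_num else 1
--         res = 1
--         if not is_num:
--             res = dfs(i + 1, cnt, False, False) % MOD
--         up = int(s[i]) if is_limit else 1
--         d0 = 0 if is_num else 1
--         for d in range(d0, up + 1):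
--             res = (res * dfs(i + 1, cnt + d, is_limit and d == up, True)) % MOD
--         return res
--
--     return dfs(0, 0, True, False)
-- ===== SOURCE B (Python) =====
-- def solve(n: int) -> int:
--     MOD = 10**7 + 7
--     if n <= 0:
--         return 1
--     memo = {}
--
--     def g(m: int, a: int) -> int:
--         # product of (popcount(k) + a) for k = 1..m, mod MOD
--         if m == 0:
--             return 1
--         key = (m, a)
--         if key in memo:
--             return memo[key]
--         v = g(m // 2, a) * g((m - 1) // 2, a + 1) % MOD * (a + 1) % MOD
--         memo[key] = v
--         return v
--
--     return g(n, 0)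
-- ===== Notes on version B (the rewrite author's own statement) =====
-- stated objective: alternative
-- what changed: Replaced the position-indexed digit DP over the binary string (is_limit/is_num flags) by a memoised divide-and-conquer on the value itself: g(m,a)=prod_{k=1..m}(popcount(k)+a) satisfies g(m,a)=g(m//2,a)*g((m-1)//2,a+1)*(a+1) mod 10**7+7, and the answer is g(n,0).
import Mathlib
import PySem

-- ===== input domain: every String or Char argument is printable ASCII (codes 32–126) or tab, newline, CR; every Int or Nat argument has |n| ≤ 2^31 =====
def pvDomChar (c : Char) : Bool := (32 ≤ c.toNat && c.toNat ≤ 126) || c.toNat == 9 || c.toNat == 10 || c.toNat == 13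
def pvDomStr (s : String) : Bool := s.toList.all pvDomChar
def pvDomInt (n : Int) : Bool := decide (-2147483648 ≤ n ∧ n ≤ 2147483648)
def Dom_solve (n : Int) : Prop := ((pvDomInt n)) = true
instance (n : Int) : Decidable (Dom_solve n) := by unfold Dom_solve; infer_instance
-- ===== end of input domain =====

-- B replaces A's digit DP over bin(n) (limit/is_num flags) by a memoised divide-and-conquer on the value: g(m,a) = prod_{k=1..m}(popcount(k)+a) with g(m,a) = g(m//2,a)*g((m-1)//2,a+1)*(a+1) mod 10**7+7.

-- ===== PORT A =====
-- bin(m)[2:] as a list of binary digits, most significant first (pyBits 0 = [], the n = 0 case is handled in `solve`)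
def pyBits (m : Nat) : List Nat :=
  if m = 0 then [] else pyBits (m / 2) ++ [m % 2]
decreasing_by exact Nat.div_lt_self (Nat.pos_of_ne_zero (by assumption)) (by norm_num)

-- dfs(i, cnt, is_limit, is_num) of A, recursing on the remaining digit list instead of the index i
-- (i and the remaining length determine each other, so the @cache dict is keyed by the remaining
-- length instead of i); the cache threading mirrors functools.cache
def dfsA (t : List Nat) (cnt : Int) (limit num : Bool)
    (memo : PySem.Dict (Nat × Int × Bool × Bool) Int) :
    Int × PySem.Dict (Nat × Int × Bool × Bool) Int :=
  match memo.get? (t.length, cnt, limit, num) with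
  | some v => (v, memo)
  | none =>
    match t with
    | [] =>
      let v : Int := if num then cnt else 1
      (v, memo.insert (0, cnt, limit, num) v)
    | d :: t' =>
      let r0 : Int × PySem.Dict (Nat × Int × Bool × Bool) Int :=
        if num then (1, memo) else
          let r := dfsA t' cnt false false memo
          (r.1 % 10000007, r.2)
      let up : Int := if limit then (d : Int) else 1
      let d0 : Int := if num then 0 else 1
      let res : Int × PySem.Dict (Nat × Int × Bool × Bool) Int :=
        (PySem.List.pyRange d0 (up + 1) 1).foldl
          (fun p dd =>
            let r := dfsA t' (cnt + dd) (limit && decide (dd = up)) true p.2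
            ((p.1 * r.1) % 10000007, r.2)) r0
      (res.1, res.2.insert (t'.length + 1, cnt, limit, num) res.1)

def solve (n : Int) : Int :=
  -- s = bin(n)[2:]; for n < 0 Python raises ValueError (excluded by Pre_solve), we use [] there
  let s : List Nat := if n < 0 then [] else if n = 0 then [0] else pyBits n.toNat
  (dfsA s 0 true false PySem.Dict.empty).1

-- ===== PORT B =====
-- g(m, a) of B: product of (popcount(k) + a) for k = 1..m mod 10**7+7, with the memo dict threaded
def gB (m : Nat) (a : Int) (memo : PySem.Dict (Nat × Int) Int) :
    Int × PySem.Dict (Nat × Int) Int :=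
  if m = 0 then (1, memo)
  else
    match memo.get? (m, a) with
    | some v => (v, memo)
    | none =>
      let r1 := gB (m / 2) a memo
      let r2 := gB ((m - 1) / 2) (a + 1) r1.2
      let v := r1.1 * r2.1 % 10000007 * (a + 1) % 10000007
      (v, r2.2.insert (m, a) v)
termination_by m
decreasing_by all_goals omega

def solve_alt (n : Int) : Int :=
  -- if n <= 0: return 1; else g(n, 0)  (n > 0, so n.toNat is exact)
  if n ≤ 0 then 1 else (gB n.toNat 0 PySem.Dict.empty).1

-- ===== PRECONDITION & SPEC =====
-- A raises ValueError for n < 0 (int(s[i]) on the 'b…' left by slicing bin(n)); Pre_ excludes exactly those inputs.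
def Pre_solve (n : Int) : Prop := 0 ≤ n
instance (n : Int) : Decidable (Pre_solve n) := by unfold Pre_solve; infer_instance
def pvWitness_solve : Int := 6

def Spec_solve (n : Int) (out : Int) : Prop := out = solve_alt n
instance (n : Int) (out : Int) : Decidable (Spec_solve n out) := by unfold Spec_solve; infer_instance

-- ===== CLAIM (what is proved, stated in full; the proofs are below) =====
def Claim_equal_solve : Prop := ∀ (n : Int), Dom_solve n → Pre_solve n → Spec_solve n (solve n)

-- ===== LEMMAS AND PROOFS =====

-- proof-side helper: the same dfs without the cache (value-equal, proved in dfsA_correct)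
def dfsP : List Nat → Int → Bool → Bool → Int
  | [], cnt, _, num => if num then cnt else 1
  | d :: t, cnt, limit, num =>
    let res0 : Int := if num then 1 else dfsP t cnt false false % 10000007
    let up : Int := if limit then (d : Int) else 1
    let d0 : Int := if num then 0 else 1
    (PySem.List.pyRange d0 (up + 1) 1).foldl
      (fun res dd => (res * dfsP t (cnt + dd) (limit && decide (dd = up)) true) % 10000007) res0

-- every cache entry is the plain dfs value of the unique suffix of s with that length
def MemoOK (s : List Nat) (memo : PySem.Dict (Nat × Int × Bool × Bool) Int) : Prop :=
  ∀ len cnt limit num v, memo.get? (len, cnt, limit, num) = some v →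
    ∃ t, t <:+ s ∧ t.length = len ∧ v = dfsP t cnt limit num

theorem suffix_eq_drop {t s : List Nat} (h : t <:+ s) : t = s.drop (s.length - t.length) := by
  obtain ⟨p, rfl⟩ := h
  have hl : (p ++ t).length - t.length = p.length := by simp
  rw [hl, List.drop_left]

theorem suffix_unique {t1 t2 s : List Nat} (h1 : t1 <:+ s) (h2 : t2 <:+ s)
    (hl : t1.length = t2.length) : t1 = t2 := by
  rw [suffix_eq_drop h1, suffix_eq_drop h2, hl]

theorem memoOK_insert (s : List Nat) (memo : PySem.Dict (Nat × Int × Bool × Bool) Int)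
    (t : List Nat) (cnt : Int) (limit num : Bool)
    (hm : MemoOK s memo) (hts : t <:+ s) :
    MemoOK s (memo.insert (t.length, cnt, limit, num) (dfsP t cnt limit num)) := by
  intro len c l nu v hv
  rw [PySem.Dict.get?_insert] at hv
  by_cases hk : ((len, c, l, nu) : Nat × Int × Bool × Bool) = (t.length, cnt, limit, num)
  · rw [if_pos hk] at hv
    obtain ⟨h1, h2, h3, h4⟩ : len = t.length ∧ c = cnt ∧ l = limit ∧ nu = num := by
      simpa using hk
    subst h1; subst h2; subst h3; subst h4
    exact ⟨t, hts, rfl, (Option.some.injEq .. ▸ hv).symm⟩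
  · rw [if_neg hk] at hv
    exact hm len c l nu v hv

theorem memoOK_empty (s : List Nat) : MemoOK s PySem.Dict.empty := by
  intro len c l nu v hv
  rw [PySem.Dict.get?_empty] at hv
  cases hv

theorem dfsA_correct (s : List Nat) : ∀ (t : List Nat) (cnt : Int) (limit num : Bool)
    (memo : PySem.Dict (Nat × Int × Bool × Bool) Int), t <:+ s → MemoOK s memo →
    (dfsA t cnt limit num memo).1 = dfsP t cnt limit num ∧
      MemoOK s (dfsA t cnt limit num memo).2 := by
  intro t
  induction t with
  | nil =>
    intro cnt limit num memo hts hm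
    rw [dfsA]
    cases hg : memo.get? (List.length [], cnt, limit, num) with
    | some v =>
      obtain ⟨t0, ht0s, ht0l, hv⟩ := hm _ _ _ _ _ hg
      have : t0 = [] := by
        cases t0 with
        | nil => rfl
        | cons a b => simp at ht0l
      subst this
      subst hv
      exact ⟨rfl, hm⟩
    | none =>
      refine ⟨rfl, ?_⟩
      have h1 : dfsP [] cnt limit num = if num then cnt else 1 := by rw [dfsP]
      have := memoOK_insert s memo [] cnt limit num hm (List.nil_suffix)
      rw [h1] at this
      simpa using this
  | cons d t' ih =>
    intro cnt limit num memo hts hm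
    have hts' : t' <:+ s := (List.suffix_cons d t').trans hts
    rw [dfsA]
    cases hg : memo.get? (List.length (d :: t'), cnt, limit, num) with
    | some v =>
      obtain ⟨t0, ht0s, ht0l, hv⟩ := hm _ _ _ _ _ hg
      have : t0 = d :: t' := suffix_unique ht0s hts ht0l
      subst this
      subst hv
      exact ⟨rfl, hm⟩
    | none =>
      simp only
      set up : Int := if limit then (d : Int) else 1 with hup
      set d0 : Int := if num then 0 else 1 with hd0
      set r0 : Int × PySem.Dict (Nat × Int × Bool × Bool) Int :=
        (if num then ((1 : Int), memo) else
          ((dfsA t' cnt false false memo).1 % 10000007, (dfsA t' cnt false false memo).2))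
        with hr0
      have hr0p : r0.1 = (if num then (1 : Int) else dfsP t' cnt false false % 10000007) ∧
          MemoOK s r0.2 := by
        rw [hr0]
        cases num with
        | false =>
          obtain ⟨he, hmo⟩ := ih cnt false false memo hts' hm
          simpa [he] using hmo
        | true => exact ⟨rfl, hm⟩
      -- the cached loop equals the plain loop and preserves the invariant
      have hfold : ∀ (l : List Int) (p : Int × PySem.Dict (Nat × Int × Bool × Bool) Int),
          MemoOK s p.2 →
          (l.foldl (fun p dd =>
              ((p.1 * (dfsA t' (cnt + dd) (limit && decide (dd = up)) true p.2).1) % 10000007,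
               (dfsA t' (cnt + dd) (limit && decide (dd = up)) true p.2).2)) p).1
            = l.foldl (fun res dd =>
                (res * dfsP t' (cnt + dd) (limit && decide (dd = up)) true) % 10000007) p.1 ∧
          MemoOK s (l.foldl (fun p dd =>
              ((p.1 * (dfsA t' (cnt + dd) (limit && decide (dd = up)) true p.2).1) % 10000007,
               (dfsA t' (cnt + dd) (limit && decide (dd = up)) true p.2).2)) p).2 := by
        intro l
        induction l with
        | nil => intro p hmo; exact ⟨rfl, hmo⟩
        | cons x l ihl =>
          intro p hmo
          obtain ⟨hx, hmx⟩ := ih (cnt + x) (limit && decide (x = up)) true p.2 hts' hmo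
          simp only [List.foldl_cons, hx]
          exact ihl _ hmx
      obtain ⟨hef, hmf⟩ := hfold (PySem.List.pyRange d0 (up + 1) 1) r0 hr0p.2
      rw [hr0p.1] at hef
      constructor
      · rw [hef]
        conv_rhs => rw [dfsP]
      · have heq : (PySem.List.pyRange d0 (up + 1) 1).foldl (fun res dd =>
            (res * dfsP t' (cnt + dd) (limit && decide (dd = up)) true) % 10000007)
            (if num then (1 : Int) else dfsP t' cnt false false % 10000007)
            = dfsP (d :: t') cnt limit num := by
          conv_rhs => rw [dfsP]
        have hins := memoOK_insert s _ (d :: t') cnt limit num hmf hts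
        rw [hef, heq]
        simpa using hins

-- popcount (proof-side: the value both programs multiply)
def pcNat (m : Nat) : Nat :=
  if m = 0 then 0 else pcNat (m / 2) + m % 2
decreasing_by exact Nat.div_lt_self (Nat.pos_of_ne_zero (by assumption)) (by norm_num)

def pcI (v : Nat) : Int := (pcNat v : Int)
-- product over v = 0..N-1 of (cnt + popcount v)
def PP (cnt : Int) (N : Nat) : Int := ∏ v ∈ Finset.range N, (cnt + pcI v)
-- product over m = 1..N of (cnt + popcount m)
def QQ (cnt : Int) (N : Nat) : Int := ∏ v ∈ Finset.range N, (cnt + pcI (v + 1))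
-- value of a MSB-first digit list
def valB : List Nat → Nat
  | [] => 0
  | d :: t => d * 2 ^ t.length + valB t

theorem solve_to_dfsP (s : List Nat) :
    (dfsA s 0 true false PySem.Dict.empty).1 = dfsP s 0 true false :=
  (dfsA_correct s s 0 true false _ (List.suffix_refl s) (memoOK_empty s)).1

theorem pcNat_zero : pcNat 0 = 0 := by rw [pcNat]; simp

theorem pcNat_step (m : Nat) (h : m ≠ 0) : pcNat m = pcNat (m / 2) + m % 2 := by
  rw [pcNat, if_neg h]

theorem pc_shift : ∀ (k v : Nat), v < 2 ^ k → pcNat (2 ^ k + v) = pcNat v + 1 := by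
  intro k
  induction k with
  | zero =>
    intro v hv
    interval_cases v
    have h1 : 2 ^ 0 + 0 = 1 := rfl
    rw [h1, pcNat_step 1 one_ne_zero]
  | succ k ih =>
    intro v hv
    have hpow : (2:Nat) ^ (k+1) = 2 * 2 ^ k := by ring
    have hps : (1:Nat) ≤ 2 ^ k := Nat.one_le_two_pow
    have hd : (2 ^ (k+1) + v) / 2 = 2 ^ k + v / 2 := by omega
    have hm : (2 ^ (k+1) + v) % 2 = v % 2 := by omega
    have hv2 : v / 2 < 2 ^ k := by omega
    rw [pcNat_step _ (by positivity), hd, hm, ih _ hv2]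
    rcases Nat.eq_zero_or_pos v with h0 | h0
    · subst h0; simp [pcNat_zero]
    · rw [pcNat_step v (by omega)]; omega

theorem modmod (a : Int) : a % 10000007 % 10000007 = a % 10000007 := Int.emod_emod_of_dvd _ dvd_rfl

theorem mulmod (a b : Int) : (a % 10000007 * (b % 10000007)) % 10000007 = a * b % 10000007 := (Int.mul_emod a b 10000007).symm

theorem mulmod_left (a b : Int) : (a % 10000007 * b) % 10000007 = a * b % 10000007 := by
  rw [Int.mul_emod, modmod, ← Int.mul_emod]

theorem mulmod_right (a b : Int) : (a * (b % 10000007)) % 10000007 = a * b % 10000007 := by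
  rw [Int.mul_emod, modmod, ← Int.mul_emod]

theorem PP_split (cnt : Int) (k j : Nat) (hj : j ≤ 2 ^ k) :
    PP cnt (2 ^ k + j) = PP cnt (2 ^ k) * PP (cnt + 1) j := by
  unfold PP
  rw [Finset.prod_range_add]
  congr 1
  refine Finset.prod_congr rfl ?_
  intro v hv
  have hv' : v < 2 ^ k := lt_of_lt_of_le (Finset.mem_range.mp hv) hj
  have h := pc_shift k v hv'
  unfold pcI
  rw [h]
  push_cast
  ring

theorem QQ_split (cnt : Int) (k j : Nat) (hj : j ≤ 2 ^ k) :
    QQ cnt (2 ^ k - 1 + j) = QQ cnt (2 ^ k - 1) * PP (cnt + 1) j := by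
  unfold QQ PP
  rw [Finset.prod_range_add]
  congr 1
  refine Finset.prod_congr rfl ?_
  intro v hv
  have hv' : v < 2 ^ k := lt_of_lt_of_le (Finset.mem_range.mp hv) hj
  have hk : 1 ≤ 2 ^ k := Nat.one_le_two_pow
  have he : 2 ^ k - 1 + v + 1 = 2 ^ k + v := by omega
  have h := pc_shift k v hv'
  unfold pcI
  rw [he, h]
  push_cast
  ring

theorem PP_one (cnt : Int) : PP cnt 1 = cnt := by
  unfold PP pcI
  rw [Finset.prod_range_one, pcNat_zero]
  norm_num

theorem QQ_zero (cnt : Int) : QQ cnt 0 = 1 := by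
  unfold QQ
  exact Finset.prod_range_zero _

theorem pyRange_01 : PySem.List.pyRange 0 1 1 = [0] := by decide
theorem pyRange_02 : PySem.List.pyRange 0 2 1 = [0, 1] := by decide
theorem pyRange_11 : PySem.List.pyRange 1 1 1 = [] := by decide
theorem pyRange_12 : PySem.List.pyRange 1 2 1 = [1] := by decide

theorem valB_lt (t : List Nat) (hb : ∀ d ∈ t, d ≤ 1) : valB t < 2 ^ t.length := by
  induction t with
  | nil => simp [valB]
  | cons d t ih =>
    have hd : d ≤ 1 := hb d List.mem_cons_self
    have h2 := ih (fun x hx => hb x (List.mem_cons_of_mem d hx))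
    rw [valB, List.length_cons, pow_succ]
    nlinarith

-- free suffix, is_num = true
theorem L_free : ∀ (t : List Nat) (cnt : Int), 0 ≤ cnt → cnt + t.length < 10000007 →
    dfsP t cnt false true = PP cnt (2 ^ t.length) % 10000007 := by
  intro t
  induction t with
  | nil =>
    intro cnt h0 h1
    simp only [List.length_nil, Nat.cast_zero, add_zero] at h1
    rw [dfsP]
    simp only [List.length_nil, pow_zero, PP_one]
    simp [Int.emod_eq_of_lt h0 h1]
  | cons d t ih =>
    intro cnt h0 h1
    simp only [List.length_cons, Nat.cast_add, Nat.cast_one] at h1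
    have hlen : (cnt + t.length) + 1 < 10000007 := by push_cast; push_cast at h1; omega
    rw [dfsP]
    norm_num
    rw [pyRange_02]
    simp only [List.foldl_cons, List.foldl_nil, Bool.false_and, add_zero, one_mul]
    rw [ih cnt h0 (by omega), ih (cnt + 1) (by omega) (by omega),
        modmod, mulmod, pow_succ, mul_two, PP_split cnt t.length _ le_rfl]

-- limited suffix, is_num = true
theorem L_lim : ∀ (t : List Nat) (cnt : Int), (∀ d ∈ t, d ≤ 1) → 0 ≤ cnt → cnt + t.length < 10000007 →
    dfsP t cnt true true = PP cnt (valB t + 1) % 10000007 := by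
  intro t
  induction t with
  | nil =>
    intro cnt _ h0 h1
    simp only [List.length_nil, Nat.cast_zero, add_zero] at h1
    rw [dfsP]
    simp only [valB, zero_add, PP_one]
    simp [Int.emod_eq_of_lt h0 h1]
  | cons d t ih =>
    intro cnt hb h0 h1
    simp only [List.length_cons, Nat.cast_add, Nat.cast_one] at h1
    have hbt : ∀ x ∈ t, x ≤ 1 := fun x hx => hb x (List.mem_cons_of_mem d hx)
    have hd : d ≤ 1 := hb d List.mem_cons_self
    rw [dfsP]
    norm_num
    interval_cases d
    · -- d = 0
      norm_num
      rw [pyRange_01]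
      simp only [List.foldl_cons, List.foldl_nil, one_mul, add_zero]
      have hc : (decide True) = true := rfl
      rw [hc, ih cnt hbt h0 (by omega), modmod, valB]
      norm_num
    · -- d = 1
      norm_num
      rw [pyRange_02]
      simp only [List.foldl_cons, List.foldl_nil, one_mul, add_zero]
      have hf : (decide ((0:Int) = 1)) = false := rfl
      have ht : (decide True) = true := rfl
      rw [hf, ht, L_free t cnt h0 (by omega), ih (cnt + 1) hbt (by omega) (by omega), mulmod, valB]
      have hv : valB t + 1 ≤ 2 ^ t.length := valB_lt t hbt
      have he : 1 * 2 ^ t.length + valB t + 1 = 2 ^ t.length + (valB t + 1) := by omega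
      rw [he, PP_split cnt t.length _ hv, mulmod_left]

-- not yet a number (leading-zero chain)
theorem L_nn : ∀ (t : List Nat) (cnt : Int), 0 ≤ cnt → cnt + t.length < 10000007 →
    dfsP t cnt false false = QQ cnt (2 ^ t.length - 1) % 10000007 := by
  intro t
  induction t with
  | nil =>
    intro cnt _ _
    rw [dfsP]
    simp only [List.length_nil, pow_zero, Nat.sub_self, QQ_zero, if_neg (Bool.false_ne_true)]
    decide
  | cons d t ih =>
    intro cnt h0 h1
    simp only [List.length_cons, Nat.cast_add, Nat.cast_one] at h1
    rw [dfsP]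
    norm_num
    rw [pyRange_12]
    simp only [List.foldl_cons, List.foldl_nil, Bool.false_and]
    rw [ih cnt h0 (by omega), modmod, L_free t (cnt + 1) (by omega) (by omega),
        mulmod_left, mulmod_right]
    have he : 2 ^ (t.length + 1) - 1 = 2 ^ t.length - 1 + 2 ^ t.length := by
      have h2 : 1 ≤ 2 ^ t.length := Nat.one_le_two_pow
      rw [pow_succ]; omega
    rw [he, QQ_split cnt t.length _ le_rfl]

theorem bits01 : ∀ m, ∀ d ∈ pyBits m, d ≤ 1 := by
  intro m
  induction m using Nat.strong_induction_on with
  | _ m ih =>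
    intro d hd
    rw [pyBits] at hd
    by_cases h : m = 0
    · simp [h] at hd
    · rw [if_neg h] at hd
      rcases List.mem_append.mp hd with h' | h'
      · exact ih (m / 2) (Nat.div_lt_self (Nat.pos_of_ne_zero h) (by norm_num)) d h'
      · simp at h'; omega

theorem valB_append (l : List Nat) (b : Nat) : valB (l ++ [b]) = 2 * valB l + b := by
  induction l with
  | nil => simp [valB]
  | cons d t ih =>
    simp only [List.cons_append, valB, List.length_append, List.length_cons, List.length_nil, ih]
    ring

theorem valB_pyBits : ∀ m, valB (pyBits m) = m := by
  intro m
  induction m using Nat.strong_induction_on with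
  | _ m ih =>
    rw [pyBits]
    by_cases h : m = 0
    · simp [h, valB]
    · rw [if_neg h, valB_append, ih (m / 2) (Nat.div_lt_self (Nat.pos_of_ne_zero h) (by norm_num))]
      omega

theorem len_pyBits : ∀ (k m : Nat), m < 2 ^ k → (pyBits m).length ≤ k := by
  intro k
  induction k with
  | zero =>
    intro m hm
    interval_cases m
    rw [pyBits]; simp
  | succ k ih =>
    intro m hm
    rw [pyBits]
    by_cases h : m = 0
    · simp [h]
    · rw [if_neg h]
      have h2 : m / 2 < 2 ^ k := by
        have : 2 ^ (k+1) = 2 * 2 ^ k := by ring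
        omega
      have := ih (m / 2) h2
      simp only [List.length_append, List.length_cons, List.length_nil]
      omega

theorem head_pyBits : ∀ m, m ≠ 0 → ∃ t, pyBits m = 1 :: t := by
  intro m
  induction m using Nat.strong_induction_on with
  | _ m ih =>
    intro h
    rw [pyBits, if_neg h]
    by_cases h2 : m / 2 = 0
    · have hm : m = 1 := by omega
      subst hm
      exact ⟨[], by rw [pyBits]; simp⟩
    · obtain ⟨t, ht⟩ := ih (m / 2) (Nat.div_lt_self (Nat.pos_of_ne_zero h) (by norm_num)) h2
      exact ⟨t ++ [m % 2], by rw [ht]; simp⟩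

def gP (m : Nat) (a : Int) : Int :=
  if m = 0 then 1
  else gP (m / 2) a * gP ((m - 1) / 2) (a + 1) % 10000007 * (a + 1) % 10000007
termination_by m
decreasing_by all_goals omega

def MemoOKG (memo : PySem.Dict (Nat × Int) Int) : Prop :=
  ∀ m a v, memo.get? (m, a) = some v → v = gP m a

theorem memoOKG_empty : MemoOKG PySem.Dict.empty := by
  intro m a v hv
  rw [PySem.Dict.get?_empty] at hv
  cases hv

theorem memoOKG_insert (memo : PySem.Dict (Nat × Int) Int) (m : Nat) (a : Int)
    (hm : MemoOKG memo) : MemoOKG (memo.insert (m, a) (gP m a)) := by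
  intro m' a' v' hv
  rw [PySem.Dict.get?_insert] at hv
  by_cases hk : ((m', a') : Nat × Int) = (m, a)
  · rw [if_pos hk] at hv
    obtain ⟨h1, h2⟩ : m' = m ∧ a' = a := by simpa using hk
    subst h1; subst h2
    exact (Option.some.injEq .. ▸ hv).symm
  · rw [if_neg hk] at hv
    exact hm m' a' v' hv

theorem gB_correct : ∀ (m : Nat) (a : Int) (memo : PySem.Dict (Nat × Int) Int),
    MemoOKG memo → (gB m a memo).1 = gP m a ∧ MemoOKG (gB m a memo).2 := by
  intro m
  induction m using Nat.strong_induction_on with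
  | _ m ih =>
    intro a memo hm
    rw [gB]
    by_cases h0 : m = 0
    · rw [if_pos h0]
      have : gP m a = 1 := by rw [gP, if_pos h0]
      exact ⟨this.symm, hm⟩
    · rw [if_neg h0]
      cases hg : memo.get? (m, a) with
      | some v => exact ⟨hm m a v hg, hm⟩
      | none =>
        simp only
        obtain ⟨h1, hm1⟩ := ih (m / 2) (by omega) a memo hm
        obtain ⟨h2, hm2⟩ := ih ((m - 1) / 2) (by omega) (a + 1) (gB (m / 2) a memo).2 hm1
        have hv : (gB (m / 2) a memo).1 * (gB ((m - 1) / 2) (a + 1) (gB (m / 2) a memo).2).1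
              % 10000007 * (a + 1) % 10000007 = gP m a := by
          rw [h1, h2]
          conv_rhs => rw [gP, if_neg h0]
        refine ⟨hv, ?_⟩
        have := memoOKG_insert (gB ((m - 1) / 2) (a + 1) (gB (m / 2) a memo).2).2 m a hm2
        rw [← hv] at this
        exact this

theorem pcNat_one : pcNat 1 = 1 := by
  rw [pcNat_step 1 one_ne_zero]
  norm_num [pcNat_zero]

theorem pc_double (k : Nat) (h : k ≠ 0) : pcNat (2 * k) = pcNat k := by
  rw [pcNat_step (2 * k) (by omega), show 2 * k / 2 = k by omega, show 2 * k % 2 = 0 by omega]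
  simp

theorem pc_odd (k : Nat) : pcNat (2 * k + 1) = pcNat k + 1 := by
  rw [pcNat_step (2 * k + 1) (by omega), show (2 * k + 1) / 2 = k by omega,
      show (2 * k + 1) % 2 = 1 by omega]

theorem QQ_succ (a : Int) (j : Nat) : QQ a (j + 1) = QQ a j * (a + pcI (j + 1)) := by
  unfold QQ
  exact Finset.prod_range_succ _ _

theorem QQ_parity : ∀ (m : Nat) (a : Int), 1 ≤ m →
    QQ a m = QQ a (m / 2) * QQ (a + 1) ((m - 1) / 2) * (a + 1) := by
  intro m
  induction m with
  | zero => intro a h; omega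
  | succ m ih =>
    intro a _
    by_cases hm0 : m = 0
    · subst hm0
      rw [show (1 : Nat) = 0 + 1 from rfl, QQ_succ, QQ_zero]
      unfold pcI
      rw [show (0 + 1 : Nat) = 1 from rfl, pcNat_one]
      norm_num
      rw [QQ_zero]
      ring
    · rcases Nat.even_or_odd m with he | ho
      · -- m = 2k (k ≥ 1), m+1 odd: QQ a (2k+1) = QQ a k * QQ (a+1) k * (a+1)
        obtain ⟨k, hk⟩ := he
        have hk1 : k ≠ 0 := by omega
        have e1 : m = 2 * k := by omega
        have ihm := ih a (by omega)
        rw [e1] at ihm ⊢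
        rw [show 2 * k / 2 = k by omega, show (2 * k - 1) / 2 = k - 1 by omega] at ihm
        rw [QQ_succ, ihm, show (2 * k + 1) / 2 = k by omega, show (2 * k + 1 - 1) / 2 = k by omega]
        have hpc : pcI (2 * k + 1) = pcI k + 1 := by
          unfold pcI; rw [pc_odd]; push_cast; ring
        have hq : QQ (a + 1) k = QQ (a + 1) (k - 1) * (a + 1 + pcI k) := by
          have e2 : k = (k - 1) + 1 := by omega
          conv_lhs => rw [e2]
          rw [QQ_succ, ← e2]
        rw [hpc, hq]
        ring
      · -- m = 2k+1, m+1 = 2k+2: QQ a (2k+2) = QQ a (k+1) * QQ (a+1) k * (a+1)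
        obtain ⟨k, hk⟩ := ho
        have e1 : m = 2 * k + 1 := by omega
        have ihm := ih a (by omega)
        rw [e1] at ihm ⊢
        rw [show (2 * k + 1) / 2 = k by omega, show (2 * k + 1 - 1) / 2 = k by omega] at ihm
        rw [QQ_succ, ihm, show (2 * k + 1 + 1) / 2 = k + 1 by omega,
            show (2 * k + 1 + 1 - 1) / 2 = k by omega]
        have hpc : pcI (2 * k + 1 + 1) = pcI (k + 1) := by
          unfold pcI
          rw [show 2 * k + 1 + 1 = 2 * (k + 1) by omega, pc_double (k + 1) (by omega)]
        have hq : QQ a (k + 1) = QQ a k * (a + pcI (k + 1)) := QQ_succ a k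
        rw [hpc, hq]
        ring

theorem gP_eq : ∀ (m : Nat) (a : Int), gP m a = QQ a m % 10000007 := by
  intro m
  induction m using Nat.strong_induction_on with
  | _ m ih =>
    intro a
    by_cases h0 : m = 0
    · rw [gP, if_pos h0, h0, QQ_zero]
      decide
    · rw [gP, if_neg h0, ih (m / 2) (by omega) a, ih ((m - 1) / 2) (by omega) (a + 1),
          mulmod, mulmod_left, ← QQ_parity m a (by omega)]

theorem solve_alt_eq : ∀ N : Nat, solve_alt (N : Int) = QQ 0 N % 10000007 := by
  intro N
  unfold solve_alt
  by_cases h0 : N = 0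
  · subst h0
    norm_num [QQ_zero]
  · have hle : ¬ ((N : Int) ≤ 0) := by omega
    rw [if_neg hle, show ((N : Int)).toNat = N from by omega,
        (gB_correct N 0 PySem.Dict.empty memoOKG_empty).1, gP_eq]

theorem solve_eq : ∀ N : Nat, N < 2 ^ 32 → solve (N : Int) = QQ 0 N % 10000007 := by
  intro N hN
  by_cases h0 : N = 0
  · subst h0
    unfold solve
    norm_num [QQ_zero]
    rw [solve_to_dfsP, dfsP]
    norm_num
    rw [dfsP]
    norm_num [pyRange_11]
  · unfold solve
    have hneg : ¬ ((N : Int) < 0) := by omega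
    have hz : ¬ ((N : Int) = 0) := by exact_mod_cast h0
    rw [if_neg hneg, if_neg hz]
    have htn : (N : Int).toNat = N := by omega
    rw [htn]
    obtain ⟨t, ht⟩ := head_pyBits N h0
    have hlen : (pyBits N).length ≤ 32 := len_pyBits 32 N hN
    have hlt : t.length ≤ 31 := by rw [ht] at hlen; simp at hlen; omega
    have hbt : ∀ x ∈ t, x ≤ 1 := by
      intro x hx
      exact bits01 N x (by rw [ht]; exact List.mem_cons_of_mem 1 hx)
    have hM : ((31 : Nat) : Int) + 1 < 10000007 := by norm_num
    rw [ht, solve_to_dfsP, dfsP]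
    norm_num
    rw [pyRange_12]
    simp only [List.foldl_cons, List.foldl_nil]
    have htt : (decide True) = true := rfl
    rw [htt, L_nn t 0 le_rfl (by push_cast; omega), modmod,
        L_lim t 1 hbt (by norm_num) (by push_cast; omega), mulmod]
    have hv : valB t + 1 ≤ 2 ^ t.length := valB_lt t hbt
    have h01 : (0 : Int) + 1 = 1 := by norm_num
    rw [← h01, ← QQ_split 0 t.length _ hv]
    have hval : 2 ^ t.length - 1 + (valB t + 1) = N := by
      have h1 : 1 ≤ 2 ^ t.length := Nat.one_le_two_pow
      have h2 := valB_pyBits N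
      rw [ht, valB] at h2
      omega
    rw [hval]

-- ===== VERDICT (by name: the statement is the Claim_ definition above) =====
theorem solve_spec : Claim_equal_solve := by
  intro n hdom hpre
  unfold Spec_solve
  unfold Dom_solve pvDomInt at hdom
  unfold Pre_solve at hpre
  simp only [decide_eq_true_eq] at hdom
  have hn : n = ((n.toNat : Nat) : Int) := by omega
  have hlt : n.toNat < 2 ^ 32 := by omega
  rw [hn, solve_eq n.toNat hlt, solve_alt_eq n.toNat]
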